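-- pv_equiv track=rewrite | github.com/Mdwiki-TD/fix_refs | wprefs/src/WikiParse/src/ParserInternalLinks.py | find_sub_links
-- ===== SOURCE A (Python) =====
-- from typing import List
--
-- def find_sub_links(string: str) -> List[str]:
--     matches: List[str] = []
--     length = len(string)
--     i = 0
--     while i < length - 1:
--         if string[i : i + 2] == "[[":
--             depth = 1
--             j = i + 2
--             while j < length - 1 and depth > 0:
--                 if string[j : j + 2] == "[[":
--                     depth += 1
--                     j += 2
--                     continue
--                 if string[j : j + 2] == "]]":
--                     depth -= 1
--                     j += 2
--                     if depth == 0: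
--                         matches.append(string[i:j])
--                         break
--                     continue
--                 j += 1
--             i = j
--             continue
--         i += 1
--     return matches
-- ===== SOURCE B (Python) =====
-- from typing import List
--
-- def find_sub_links(string: str) -> List[str]:
--     # One pass with an explicit stack of opening-bracket-pair start positions instead of nested loops with a depth counter.
--     matches: List[str] = []
--     length = len(string)
--     stack: List[int] = []
--     i = 0
--     while i < length - 1:
--         pair = string[i : i + 2]
--         if pair == "[[":
--             stack.append(i)
--             i += 2
--         elif pair == "]]" and stack:
--             start = stack.pop()
--             i += 2
--             if not stack:
--                 matches.append(string[start:i])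
--         else:
--             i += 1
--     return matches
-- ===== Notes on version B (the rewrite author's own statement) =====
-- stated objective: simpler
-- what changed: Replaces A's nested outer/inner while loops with a depth counter by one single-pass loop over one index that keeps an explicit stack of opening-bracket-pair start positions, appending a match when the stack empties.
import Mathlib
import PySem

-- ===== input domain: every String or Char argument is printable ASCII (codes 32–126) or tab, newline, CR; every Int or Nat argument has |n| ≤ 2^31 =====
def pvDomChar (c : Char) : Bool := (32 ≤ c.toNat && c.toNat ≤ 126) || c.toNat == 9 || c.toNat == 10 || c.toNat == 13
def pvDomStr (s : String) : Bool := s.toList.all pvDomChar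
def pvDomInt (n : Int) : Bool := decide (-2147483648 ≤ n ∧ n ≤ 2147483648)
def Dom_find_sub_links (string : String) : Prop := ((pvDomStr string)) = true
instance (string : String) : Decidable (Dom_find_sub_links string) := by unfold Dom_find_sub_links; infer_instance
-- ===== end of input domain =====

-- B replaces A's nested outer/inner while loops with a depth counter by one pass over a
-- single index maintaining an explicit stack of opening-bracket-pair start positions (objective: simpler).
-- Both loops advance their index by ≥ 1 per iteration, so fuel = length is never exhausted;
-- the fuel parameter is only a totality device.

-- ===== PORT A =====
-- A's inner while loop: scans from j with the current nesting depth; returns the final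
-- value of j and whether it broke out with depth == 0 (a completed match).
def fslInner (cs : List Char) (fuel j depth : Nat) : Nat × Bool :=
  if j < cs.length - 1 ∧ 0 < depth then
    match fuel with
    | 0 => (j, false)
    | fuel + 1 =>
      if PySem.List.slice cs (some (j : Int)) (some ((j + 2 : Nat) : Int)) = ['[', '['] then
        fslInner cs fuel (j + 2) (depth + 1)
      else if PySem.List.slice cs (some (j : Int)) (some ((j + 2 : Nat) : Int)) = [']', ']'] then
        if depth - 1 = 0 then (j + 2, true) else fslInner cs fuel (j + 2) (depth - 1)
      else
        fslInner cs fuel (j + 1) depth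
  else
    (j, false)

-- A's outer while loop over i, accumulating the matches.
def fslOuter (cs : List Char) (fuel i : Nat) (ms : List String) : List String :=
  if i < cs.length - 1 then
    match fuel with
    | 0 => ms
    | fuel + 1 =>
      if PySem.List.slice cs (some (i : Int)) (some ((i + 2 : Nat) : Int)) = ['[', '['] then
        let r := fslInner cs fuel (i + 2) 1
        fslOuter cs fuel r.1
          (if r.2 then
            ms ++ [String.ofList (PySem.List.slice cs (some (i : Int)) (some (r.1 : Int)))]
          else ms)
      else
        fslOuter cs fuel (i + 1) ms
  else
    ms

def find_sub_links (string : String) : List String :=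
  fslOuter string.toList string.toList.length 0 []

-- ===== PORT B =====
-- B's single loop: i scans once; stack holds the start positions of open bracket groups.
def fslB (cs : List Char) (fuel i : Nat) (stack : List Nat) (ms : List String) : List String :=
  if i < cs.length - 1 then
    match fuel with
    | 0 => ms
    | fuel + 1 =>
      if PySem.List.slice cs (some (i : Int)) (some ((i + 2 : Nat) : Int)) = ['[', '['] then
        fslB cs fuel (i + 2) (i :: stack) ms
      else if PySem.List.slice cs (some (i : Int)) (some ((i + 2 : Nat) : Int)) = [']', ']'] then
        match stack with
        | start :: rest =>
          fslB cs fuel (i + 2) rest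
            (if rest.isEmpty then
              ms ++ [String.ofList (PySem.List.slice cs (some (start : Int)) (some ((i + 2 : Nat) : Int)))]
            else ms)
        | [] => fslB cs fuel (i + 1) [] ms
      else
        fslB cs fuel (i + 1) stack ms
  else
    ms

def find_sub_links_alt (string : String) : List String :=
  fslB string.toList string.toList.length 0 [] []

-- ===== PRECONDITION & SPEC =====
def Spec_find_sub_links (string : String) (out : List String) : Prop := out = find_sub_links_alt string
instance (string : String) (out : List String) : Decidable (Spec_find_sub_links string out) := by unfold Spec_find_sub_links; infer_instance

-- ===== CLAIM (what is proved, stated in full; the proofs are below) =====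
def Claim_equal_find_sub_links : Prop := ∀ (string : String), Dom_find_sub_links string → Spec_find_sub_links string (find_sub_links string)

-- ===== LEMMAS AND PROOFS =====

-- one-step equations for the three loops (rw [fslInner] would unfold every occurrence)
theorem fslInner_stop (cs : List Char) (fuel j d : Nat) (h : ¬ (j < cs.length - 1 ∧ 0 < d)) :
    fslInner cs fuel j d = (j, false) := by
  conv_lhs => rw [fslInner.eq_def]
  simp [h]

theorem fslInner_open (cs : List Char) (fuel j d : Nat) (h : j < cs.length - 1 ∧ 0 < d)
    (h1 : PySem.List.slice cs (some (j : Int)) (some ((j : Int) + 2)) = ['[', '[']) :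
    fslInner cs (fuel + 1) j d = fslInner cs fuel (j + 2) (d + 1) := by
  conv_lhs => rw [fslInner.eq_def]
  simp [h, h1]

theorem fslInner_close_done (cs : List Char) (fuel j d : Nat) (h : j < cs.length - 1 ∧ 0 < d)
    (_h1 : ¬ PySem.List.slice cs (some (j : Int)) (some ((j : Int) + 2)) = ['[', '['])
    (h2 : PySem.List.slice cs (some (j : Int)) (some ((j : Int) + 2)) = [']', ']'])
    (hd : d - 1 = 0) : fslInner cs (fuel + 1) j d = (j + 2, true) := by
  conv_lhs => rw [fslInner.eq_def]
  simp [h, h2, hd]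

theorem fslInner_close_cont (cs : List Char) (fuel j d : Nat) (h : j < cs.length - 1 ∧ 0 < d)
    (_h1 : ¬ PySem.List.slice cs (some (j : Int)) (some ((j : Int) + 2)) = ['[', '['])
    (h2 : PySem.List.slice cs (some (j : Int)) (some ((j : Int) + 2)) = [']', ']'])
    (hd : ¬ d - 1 = 0) : fslInner cs (fuel + 1) j d = fslInner cs fuel (j + 2) (d - 1) := by
  conv_lhs => rw [fslInner.eq_def]
  simp [h, h2, hd]

theorem fslInner_adv (cs : List Char) (fuel j d : Nat) (h : j < cs.length - 1 ∧ 0 < d)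
    (h1 : ¬ PySem.List.slice cs (some (j : Int)) (some ((j : Int) + 2)) = ['[', '['])
    (h2 : ¬ PySem.List.slice cs (some (j : Int)) (some ((j : Int) + 2)) = [']', ']']) :
    fslInner cs (fuel + 1) j d = fslInner cs fuel (j + 1) d := by
  conv_lhs => rw [fslInner.eq_def]
  simp [h, h1, h2]

theorem fslB_stop (cs : List Char) (fuel i : Nat) (st : List Nat) (acc : List String)
    (h : ¬ i < cs.length - 1) : fslB cs fuel i st acc = acc := by
  conv_lhs => rw [fslB.eq_def]
  simp [h]

theorem fslB_open (cs : List Char) (fuel i : Nat) (st : List Nat) (acc : List String)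
    (h : i < cs.length - 1)
    (h1 : PySem.List.slice cs (some (i : Int)) (some ((i : Int) + 2)) = ['[', '[']) :
    fslB cs (fuel + 1) i st acc = fslB cs fuel (i + 2) (i :: st) acc := by
  conv_lhs => rw [fslB.eq_def]
  simp [h, h1]

theorem fslB_close_cons (cs : List Char) (fuel i x : Nat) (rest : List Nat) (acc : List String)
    (h : i < cs.length - 1)
    (_h1 : ¬ PySem.List.slice cs (some (i : Int)) (some ((i : Int) + 2)) = ['[', '['])
    (h2 : PySem.List.slice cs (some (i : Int)) (some ((i : Int) + 2)) = [']', ']']) :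
    fslB cs (fuel + 1) i (x :: rest) acc = fslB cs fuel (i + 2) rest
      (if rest.isEmpty then
        acc ++ [String.ofList (PySem.List.slice cs (some (x : Int)) (some ((i : Int) + 2)))]
      else acc) := by
  conv_lhs => rw [fslB.eq_def]
  simp [h, h2]

theorem fslB_close_nil (cs : List Char) (fuel i : Nat) (acc : List String)
    (h : i < cs.length - 1)
    (_h1 : ¬ PySem.List.slice cs (some (i : Int)) (some ((i : Int) + 2)) = ['[', '['])
    (h2 : PySem.List.slice cs (some (i : Int)) (some ((i : Int) + 2)) = [']', ']']) :
    fslB cs (fuel + 1) i [] acc = fslB cs fuel (i + 1) [] acc := by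
  conv_lhs => rw [fslB.eq_def]
  simp [h, h2]

theorem fslB_adv (cs : List Char) (fuel i : Nat) (st : List Nat) (acc : List String)
    (h : i < cs.length - 1)
    (h1 : ¬ PySem.List.slice cs (some (i : Int)) (some ((i : Int) + 2)) = ['[', '['])
    (h2 : ¬ PySem.List.slice cs (some (i : Int)) (some ((i : Int) + 2)) = [']', ']']) :
    fslB cs (fuel + 1) i st acc = fslB cs fuel (i + 1) st acc := by
  conv_lhs => rw [fslB.eq_def]
  cases st <;> simp [h, h1, h2]

theorem fslOuter_stop (cs : List Char) (fuel i : Nat) (acc : List String)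
    (h : ¬ i < cs.length - 1) : fslOuter cs fuel i acc = acc := by
  conv_lhs => rw [fslOuter.eq_def]
  simp [h]

theorem fslOuter_open (cs : List Char) (fuel i : Nat) (acc : List String)
    (h : i < cs.length - 1)
    (h1 : PySem.List.slice cs (some (i : Int)) (some ((i : Int) + 2)) = ['[', '[']) :
    fslOuter cs (fuel + 1) i acc = fslOuter cs fuel (fslInner cs fuel (i + 2) 1).1
      (if (fslInner cs fuel (i + 2) 1).2 then
        acc ++ [String.ofList (PySem.List.slice cs (some (i : Int))
          (some ((fslInner cs fuel (i + 2) 1).1 : Int)))]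
      else acc) := by
  conv_lhs => rw [fslOuter.eq_def]
  simp [h, h1]

theorem fslOuter_adv (cs : List Char) (fuel i : Nat) (acc : List String)
    (h : i < cs.length - 1)
    (h1 : ¬ PySem.List.slice cs (some (i : Int)) (some ((i : Int) + 2)) = ['[', '[']) :
    fslOuter cs (fuel + 1) i acc = fslOuter cs fuel (i + 1) acc := by
  conv_lhs => rw [fslOuter.eq_def]
  simp [h, h1]

-- the final j never moves backwards
theorem fslInner_ge (cs : List Char) (fuel j depth : Nat) : j ≤ (fslInner cs fuel j depth).1 := by
  fun_induction fslInner cs fuel j depth <;> simp_all <;> omega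

-- with enough fuel, if the inner loop exits without a match it has run off the end
theorem fslInner_false (cs : List Char) (fuel j depth : Nat) (hd : 0 < depth)
    (hfuel : cs.length - j ≤ fuel) (hf : (fslInner cs fuel j depth).2 = false) :
    ¬ (fslInner cs fuel j depth).1 < cs.length - 1 := by
  fun_induction fslInner cs fuel j depth <;> simp_all
  all_goals omega

-- with enough fuel, extra fuel does not change B's result
theorem fslB_mono (cs : List Char) :
    ∀ (f1 f2 i : Nat) (st : List Nat) (acc : List String),
      cs.length - i ≤ f1 → f1 ≤ f2 → fslB cs f1 i st acc = fslB cs f2 i st acc := by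
  intro f1
  induction f1 with
  | zero =>
    intro f2 i st acc h1 _
    have hi : ¬ i < cs.length - 1 := by omega
    rw [fslB_stop cs 0 i st acc hi, fslB_stop cs f2 i st acc hi]
  | succ f1 ih =>
    intro f2 i st acc h1 hle
    by_cases hi : i < cs.length - 1
    · obtain ⟨f2, rfl⟩ : ∃ g, f2 = g + 1 := ⟨f2 - 1, by omega⟩
      by_cases ha : PySem.List.slice cs (some (i : Int)) (some ((i : Int) + 2)) = ['[', '[']
      · rw [fslB_open cs f1 i st acc hi ha, fslB_open cs f2 i st acc hi ha]
        exact ih f2 (i + 2) (i :: st) acc (by omega) (by omega)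
      · by_cases hb : PySem.List.slice cs (some (i : Int)) (some ((i : Int) + 2)) = [']', ']']
        · cases st with
          | nil =>
            rw [fslB_close_nil cs f1 i acc hi ha hb, fslB_close_nil cs f2 i acc hi ha hb]
            exact ih f2 (i + 1) [] acc (by omega) (by omega)
          | cons x rest =>
            rw [fslB_close_cons cs f1 i x rest acc hi ha hb,
              fslB_close_cons cs f2 i x rest acc hi ha hb]
            exact ih f2 (i + 2) rest _ (by omega) (by omega)
        · rw [fslB_adv cs f1 i st acc hi ha hb, fslB_adv cs f2 i st acc hi ha hb]
          exact ih f2 (i + 1) st acc (by omega) (by omega)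
    · rw [fslB_stop cs _ i st acc hi, fslB_stop cs _ i st acc hi]

-- bridge: B's loop with a nonempty stack ss ++ [s0] (depth = ss.length + 1) mirrors A's inner
-- loop: on a match B appends the slice from the bottom start s0 and goes on with empty stack.
theorem fslB_inner (cs : List Char) (s0 : Nat) :
    ∀ (fuel j : Nat) (ss : List Nat) (acc : List String), cs.length - j ≤ fuel →
    fslB cs fuel j (ss ++ [s0]) acc =
      if (fslInner cs fuel j (ss.length + 1)).2 then
        fslB cs fuel (fslInner cs fuel j (ss.length + 1)).1 []
          (acc ++ [String.ofList (PySem.List.slice cs (some (s0 : Int))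
            (some ((fslInner cs fuel j (ss.length + 1)).1 : Int)))])
      else acc := by
  intro fuel
  induction fuel with
  | zero =>
    intro j ss acc hn
    have hj : ¬ j < cs.length - 1 := by omega
    rw [fslB_stop cs 0 j _ acc hj, fslInner_stop cs 0 j _ (by tauto)]
    simp
  | succ fuel ih =>
    intro j ss acc hn
    by_cases hj : j < cs.length - 1
    · by_cases h1 : PySem.List.slice cs (some (j : Int)) (some ((j : Int) + 2)) = ['[', '[']
      · rw [fslB_open cs fuel j _ acc hj h1, fslInner_open cs fuel j _ ⟨hj, by omega⟩ h1]
        have hih := ih (j + 2) (j :: ss) acc (by omega)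
        simp only [List.cons_append, List.length_cons] at hih
        rw [hih]
        by_cases hm : (fslInner cs fuel (j + 2) (ss.length + 1 + 1)).2
        · rw [if_pos hm, if_pos hm]
          have hge := fslInner_ge cs fuel (j + 2) (ss.length + 1 + 1)
          exact fslB_mono cs fuel (fuel + 1) _ [] _ (by omega) (by omega)
        · rw [if_neg hm, if_neg hm]
      · by_cases h2 : PySem.List.slice cs (some (j : Int)) (some ((j : Int) + 2)) = [']', ']']
        · cases ss with
          | nil =>
            simp only [List.nil_append, List.length_nil, Nat.zero_add]
            rw [fslB_close_cons cs fuel j s0 [] acc hj h1 h2,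
              fslInner_close_done cs fuel j 1 ⟨hj, by omega⟩ h1 h2 (by omega)]
            simp only [List.isEmpty_nil, if_pos]
            exact fslB_mono cs fuel (fuel + 1) (j + 2) [] _ (by omega) (by omega)
          | cons x ss' =>
            simp only [List.cons_append, List.length_cons]
            rw [fslB_close_cons cs fuel j x (ss' ++ [s0]) acc hj h1 h2,
              fslInner_close_cont cs fuel j (ss'.length + 1 + 1) ⟨hj, by omega⟩ h1 h2 (by omega)]
            have hih := ih (j + 2) ss' acc (by omega)
            simp only [Nat.add_sub_cancel]
            rw [show (ss' ++ [s0]).isEmpty = false by simp, if_neg (by simp), hih]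
            by_cases hm : (fslInner cs fuel (j + 2) (ss'.length + 1)).2
            · rw [if_pos hm, if_pos hm]
              have hge := fslInner_ge cs fuel (j + 2) (ss'.length + 1)
              exact fslB_mono cs fuel (fuel + 1) _ [] _ (by omega) (by omega)
            · rw [if_neg hm, if_neg hm]
        · rw [fslB_adv cs fuel j _ acc hj h1 h2, fslInner_adv cs fuel j _ ⟨hj, by omega⟩ h1 h2]
          rw [ih (j + 1) ss acc (by omega)]
          by_cases hm : (fslInner cs fuel (j + 1) (ss.length + 1)).2
          · rw [if_pos hm, if_pos hm]
            have hge := fslInner_ge cs fuel (j + 1) (ss.length + 1)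
            exact fslB_mono cs fuel (fuel + 1) _ [] _ (by omega) (by omega)
          · rw [if_neg hm, if_neg hm]
    · rw [fslB_stop cs _ j _ acc hj, fslInner_stop cs _ j _ (by tauto)]
      simp

-- main correspondence: A's outer loop equals B's loop started with an empty stack
theorem fslOuter_eq (cs : List Char) :
    ∀ (fuel i : Nat) (acc : List String), cs.length - i ≤ fuel →
      fslOuter cs fuel i acc = fslB cs fuel i [] acc := by
  intro fuel
  induction fuel with
  | zero =>
    intro i acc hn
    have hi : ¬ i < cs.length - 1 := by omega
    rw [fslOuter_stop cs 0 i acc hi, fslB_stop cs 0 i [] acc hi]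
  | succ fuel ih =>
    intro i acc hn
    by_cases hi : i < cs.length - 1
    · by_cases h1 : PySem.List.slice cs (some (i : Int)) (some ((i : Int) + 2)) = ['[', '[']
      · rw [fslOuter_open cs fuel i acc hi h1, fslB_open cs fuel i [] acc hi h1]
        have hbr := fslB_inner cs i fuel (i + 2) [] acc (by omega)
        simp only [List.nil_append, List.length_nil, Nat.zero_add] at hbr
        rw [hbr]
        have hge := fslInner_ge cs fuel (i + 2) 1
        by_cases hm : (fslInner cs fuel (i + 2) 1).2
        · rw [if_pos hm, if_pos hm]
          exact ih _ _ (by omega)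
        · rw [if_neg hm, if_neg hm]
          have hend := fslInner_false cs fuel (i + 2) 1 (by omega) (by omega) (by simpa using hm)
          exact fslOuter_stop cs fuel _ acc hend
      · by_cases h2 : PySem.List.slice cs (some (i : Int)) (some ((i : Int) + 2)) = [']', ']']
        · rw [fslOuter_adv cs fuel i acc hi h1, fslB_close_nil cs fuel i acc hi h1 h2]
          exact ih _ _ (by omega)
        · rw [fslOuter_adv cs fuel i acc hi h1, fslB_adv cs fuel i [] acc hi h1 h2]
          exact ih _ _ (by omega)
    · rw [fslOuter_stop cs _ i acc hi, fslB_stop cs _ i [] acc hi]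

-- ===== VERDICT (by name: the statement is the Claim_ definition above) =====
theorem find_sub_links_spec : Claim_equal_find_sub_links := by
  intro s _
  unfold Spec_find_sub_links find_sub_links find_sub_links_alt
  exact fslOuter_eq s.toList s.toList.length 0 [] (by omega)
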